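-- pv_equiv track=rewrite | github.com/santos22/emoji-in-the-haystack | search/management/commands/initemojidata.py | handle_code
-- ===== SOURCE A (Python) =====
-- def handle_code(emoji):
--     """
--     U+1F1EC, U+1F1FE - > &#x1F1EC&#x1F1FE
--     """
--     unified = emoji.get('non_qualified') or emoji.get('unified')
--     unified = unified.split('-')
--
--     codes = []
--     for code in unified:
--         _code = '&#x' + code
--         codes.append(_code)
--
--     return ''.join(codes)
-- ===== SOURCE B (Python) =====
-- def handle_code(emoji):
--     """
--     U+1F1EC, U+1F1FE - > &#x1F1EC&#x1F1FE
--     """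
--     unified = emoji.get('non_qualified') or emoji.get('unified')
--     return '&#x' + unified.replace('-', '&#x')
-- ===== Notes on version B (the rewrite author's own statement) =====
-- stated objective: simpler
-- what changed: The split/loop/append/join pipeline is replaced by a single str.replace: '&#x' + unified.replace('-', '&#x') inserts the prefix at the start and at every dash, eliminating the list and the loop.
import Mathlib
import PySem

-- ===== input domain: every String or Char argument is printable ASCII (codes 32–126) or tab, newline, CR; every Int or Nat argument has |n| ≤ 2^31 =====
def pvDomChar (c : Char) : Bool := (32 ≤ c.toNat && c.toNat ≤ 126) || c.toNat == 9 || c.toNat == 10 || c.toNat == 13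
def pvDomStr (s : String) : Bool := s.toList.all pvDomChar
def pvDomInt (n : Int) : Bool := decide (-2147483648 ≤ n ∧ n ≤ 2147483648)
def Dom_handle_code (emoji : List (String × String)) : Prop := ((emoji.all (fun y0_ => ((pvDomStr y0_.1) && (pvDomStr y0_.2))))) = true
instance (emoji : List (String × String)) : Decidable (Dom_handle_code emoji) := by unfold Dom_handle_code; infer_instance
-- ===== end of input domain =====

-- B replaces A's split/loop/append/join pipeline with a single str.replace inserting the '&#x' prefix; same values, simpler code.

-- shared guard `emoji.get('non_qualified') or emoji.get('unified')` (identical in both Pythons):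
-- Python's `or` returns the second operand whenever the first is falsy (None or "")
def pvChosen (emoji : List (String × String)) : Option String :=
  match List.lookup "non_qualified" emoji with
  | some s => if s ≠ "" then some s else List.lookup "unified" emoji
  | none => List.lookup "unified" emoji

-- ===== PORT A =====
def handle_code (emoji : List (String × String)) : String :=
  match pvChosen emoji with
  | none => ""   -- unreachable under Pre_handle_code: Python raises AttributeError here
  | some u =>
    let parts := PySem.Chars.splitOn u.toList ['-']            -- unified.split('-')
    let codes := parts.foldl (fun cs code => cs ++ [['&','#','x'] ++ code]) []   -- the loop appending '&#x' + code
    String.ofList (PySem.Chars.join [] codes)                      -- ''.join(codes)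

-- ===== PORT B =====
def handle_code_alt (emoji : List (String × String)) : String :=
  match pvChosen emoji with
  | none => ""   -- unreachable under Pre_handle_code: Python raises AttributeError here
  | some u => String.ofList (['&','#','x'] ++ PySem.Chars.replace u.toList ['-'] ['&','#','x'])  -- '&#x' + unified.replace('-','&#x')

-- ===== PRECONDITION & SPEC =====
-- Pre_ excludes exactly the inputs where both lookups are falsy (missing/empty 'non_qualified'
-- and missing 'unified'): there both Pythons raise AttributeError (None.split / None.replace).
def Pre_handle_code (emoji : List (String × String)) : Prop :=
  (List.lookup "non_qualified" emoji).getD "" ≠ "" ∨ (List.lookup "unified" emoji).isSome = true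
instance (emoji : List (String × String)) : Decidable (Pre_handle_code emoji) := by unfold Pre_handle_code; infer_instance
def pvWitness_handle_code : (List (String × String)) := [("unified", "1F1EC-1F1FE")]

def Spec_handle_code (emoji : List (String × String)) (out : String) : Prop := out = handle_code_alt emoji
instance (emoji : List (String × String)) (out : String) : Decidable (Spec_handle_code emoji out) := by unfold Spec_handle_code; infer_instance

-- ===== CLAIM (what is proved, stated in full; the proofs are below) =====
def Claim_equal_handle_code : Prop := ∀ (emoji : List (String × String)), Dom_handle_code emoji → Pre_handle_code emoji → Spec_handle_code emoji (handle_code emoji)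

-- ===== LEMMAS AND PROOFS =====

-- the pieces of `split('-')` as (first piece, remaining pieces)
def pvSp : List Char → List Char × List (List Char)
  | [] => ([], [])
  | c :: t => if c = '-' then ([], (pvSp t).1 :: (pvSp t).2) else (c :: (pvSp t).1, (pvSp t).2)

-- `replace('-', pre)` as a simple recursion
def pvRep (pre : List Char) : List Char → List Char
  | [] => []
  | c :: t => if c = '-' then pre ++ pvRep pre t else c :: pvRep pre t

theorem pvSp_nil : pvSp [] = ([], []) := rfl
theorem pvSp_cons (c : Char) (t : List Char) :
    pvSp (c :: t) = if c = '-' then ([], (pvSp t).1 :: (pvSp t).2) else (c :: (pvSp t).1, (pvSp t).2) := rfl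
theorem pvRep_cons (pre : List Char) (c : Char) (t : List Char) :
    pvRep pre (c :: t) = if c = '-' then pre ++ pvRep pre t else c :: pvRep pre t := rfl

theorem pvPrefix_dash (c : Char) (rest : List Char) :
    List.isPrefixOf ['-'] (c :: rest) = ('-' == c) := by
  simp [List.isPrefixOf]

theorem pvSplitOn_go_eq (fuel : Nat) : ∀ (l cur : List Char) (accs : List (List Char)),
    l.length ≤ fuel →
    PySem.Chars.splitOn.go ['-'] fuel l cur accs = accs.reverse ++ ((cur.reverse ++ (pvSp l).1) :: (pvSp l).2) := by
  induction fuel with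
  | zero =>
    intro l cur accs h
    have hl : l = [] := by cases l <;> simp_all
    subst hl
    simp [PySem.Chars.splitOn.go, pvSp_nil]
  | succ f ih =>
    intro l cur accs h
    cases l with
    | nil => simp [PySem.Chars.splitOn.go, pvSp_nil]
    | cons c rest =>
      simp only [PySem.Chars.splitOn.go, pvPrefix_dash]
      by_cases hc : c = '-'
      · rw [if_pos (by simp [hc])]
        rw [ih (List.drop ['-'].length (c :: rest)) [] (cur.reverse :: accs)
             (by simpa using Nat.le_of_succ_le_succ h)]
        simp [pvSp_cons, hc]
      · rw [if_neg (by simp only [beq_iff_eq]; exact fun h => hc h.symm)]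
        rw [ih rest (c :: cur) accs (by simpa using Nat.le_of_succ_le_succ h)]
        simp [pvSp_cons, hc]

theorem pvReplace_go_eq (pre : List Char) (fuel : Nat) : ∀ (l acc : List Char),
    l.length ≤ fuel →
    PySem.Chars.replace.go ['-'] pre fuel l acc = acc.reverse ++ pvRep pre l := by
  induction fuel with
  | zero =>
    intro l acc h
    have hl : l = [] := by cases l <;> simp_all
    subst hl
    simp [PySem.Chars.replace.go, pvRep]
  | succ f ih =>
    intro l acc h
    cases l with
    | nil => simp [PySem.Chars.replace.go, pvRep]
    | cons c rest =>
      simp only [PySem.Chars.replace.go, pvPrefix_dash]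
      by_cases hc : c = '-'
      · rw [if_pos (by simp [hc])]
        rw [ih (List.drop ['-'].length (c :: rest)) (pre.reverse ++ acc)
             (by simpa using Nat.le_of_succ_le_succ h)]
        simp [pvRep_cons, hc]
      · rw [if_neg (by simp only [beq_iff_eq]; exact fun h => hc h.symm)]
        rw [ih rest (c :: acc) (by simpa using Nat.le_of_succ_le_succ h)]
        simp [pvRep_cons, hc]

theorem pvSplitOn_eq (l : List Char) :
    PySem.Chars.splitOn l ['-'] = (pvSp l).1 :: (pvSp l).2 := by
  unfold PySem.Chars.splitOn
  rw [pvSplitOn_go_eq (l.length + 1) l [] [] (Nat.le_succ _)]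
  simp

theorem pvReplace_eq (pre l : List Char) :
    PySem.Chars.replace l ['-'] pre = pvRep pre l := by
  unfold PySem.Chars.replace
  rw [if_neg (by simp)]
  rw [pvReplace_go_eq pre l.length l [] (Nat.le_refl _)]
  simp

theorem pvFoldl_codes (pre : List Char) (parts : List (List Char)) : ∀ init : List (List Char),
    parts.foldl (fun cs code => cs ++ [pre ++ code]) init = init ++ parts.map (pre ++ ·) := by
  induction parts with
  | nil => simp
  | cons a t ih => intro init; simp [List.foldl_cons, ih]

theorem pvJoin_nil_flatten (parts : List (List Char)) :
    PySem.Chars.join [] parts = parts.flatten := by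
  induction parts with
  | nil => simp [PySem.Chars.join, List.intercalate]
  | cons a t ih =>
    cases t with
    | nil => simp [PySem.Chars.join, List.intercalate]
    | cons b r =>
      simp only [PySem.Chars.join, List.intercalate, List.intersperse] at *
      simp_all

theorem pvRep_sp (pre : List Char) (l : List Char) :
    pvRep pre l = (pvSp l).1 ++ (((pvSp l).2).map (pre ++ ·)).flatten := by
  induction l with
  | nil => simp [pvRep, pvSp_nil]
  | cons c t ih =>
    by_cases hc : c = '-'
    · simp [pvRep_cons, pvSp_cons, hc, ih]
    · simp [pvRep_cons, pvSp_cons, hc, ih]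

-- ===== VERDICT (by name: the statement is the Claim_ definition above) =====
theorem handle_code_spec : Claim_equal_handle_code := by
  intro emoji _ _
  unfold Spec_handle_code handle_code handle_code_alt
  cases pvChosen emoji with
  | none => rfl
  | some u =>
    simp only [pvSplitOn_eq, pvFoldl_codes, pvJoin_nil_flatten, pvReplace_eq, List.nil_append]
    rw [pvRep_sp]
    simp [List.map_cons]
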